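-- pv_equiv track=rewrite | github.com/TP-distribuidos/tp1-distribuidos | docker_compose_generator_files/workers/count.py | generate_output_queues_config
-- ===== SOURCE A (Python) =====
-- def calculate_workers_per_shard(num_shards=2, num_workers_per_shard=2):
--     """
--     Calculate the distribution of count workers per shard.
--
--     Args:
--         num_shards (int): Number of shards
--         num_workers_per_shard (int): Target number of workers per shard
--
--     Returns:
--         list: List containing the number of workers for each shard
--     """
--     return [num_workers_per_shard] * num_shards
--
-- def generate_output_queues_config(num_shards=2, num_workers_per_shard=2):
--     """
--     Generate the output queues configuration for the count_router.
--
--     Args: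
--         num_shards (int): Number of shards
--         num_workers_per_shard (int): Target number of workers per shard
--
--     Returns:
--         str: JSON-like string representation of sharded output queues
--     """
--     workers_per_shard = calculate_workers_per_shard(num_shards, num_workers_per_shard)
--
--     shards_config = []
--     worker_id = 1
--
--     for worker_count in workers_per_shard:
--         shard = []
--         for _ in range(worker_count):
--             shard.append(f"count_worker_{worker_id}")
--             worker_id += 1
--
--         # Format the shard as a JSON array string
--         shard_str = '[' + ','.join([f'"{q}"' for q in shard]) + ']'
--         shards_config.append(shard_str)
--
--     # Combine all shards into the final config string
--     output_queues = '[' + ','.join(shards_config) + ']'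
--     return output_queues
-- ===== SOURCE B (Python) =====
-- def generate_output_queues_config(num_shards=2, num_workers_per_shard=2):
--     n = max(num_shards, 0)
--     w = max(num_workers_per_shard, 0)
--     names = [f'"count_worker_{k}"' for k in range(1, n * w + 1)]
--     return '[' + ','.join('[' + ','.join(names[s * w:(s + 1) * w]) + ']' for s in range(n)) + ']'
-- ===== Notes on version B (the rewrite author's own statement) =====
-- stated objective: alternative
-- what changed: Replaces A's running worker_id counter threaded through interleaved append/format loops by building one flat list of all quoted worker names with closed-form ids, then cutting it into shards by slicing (names[s*w:(s+1)*w]) in a separate serialization pass.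
import Mathlib
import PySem

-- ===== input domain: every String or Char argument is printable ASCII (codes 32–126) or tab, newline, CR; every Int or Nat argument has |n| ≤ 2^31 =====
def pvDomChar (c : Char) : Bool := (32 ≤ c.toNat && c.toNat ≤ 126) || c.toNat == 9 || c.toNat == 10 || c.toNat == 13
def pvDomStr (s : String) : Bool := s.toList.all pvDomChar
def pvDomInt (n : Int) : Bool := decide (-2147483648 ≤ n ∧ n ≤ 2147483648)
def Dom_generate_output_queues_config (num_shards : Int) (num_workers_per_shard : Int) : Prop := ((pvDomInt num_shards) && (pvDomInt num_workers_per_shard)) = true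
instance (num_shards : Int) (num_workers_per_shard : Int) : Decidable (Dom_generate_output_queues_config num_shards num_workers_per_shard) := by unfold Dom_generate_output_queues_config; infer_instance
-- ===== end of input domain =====

-- B builds one flat list of all quoted worker names with closed-form ids and cuts it into
-- shards by slicing, instead of A's running counter threaded through interleaved
-- append/format loops (objective: alternative).

-- ===== PORT A =====
def generate_output_queues_config (num_shards : Int) (num_workers_per_shard : Int) : String :=
  let workers_per_shard := PySem.List.pyRepeat [num_workers_per_shard] num_shards
  let res := workers_per_shard.foldl
    (fun (acc : List String × Int) worker_count =>
      let inner := (PySem.List.pyRange 0 worker_count 1).foldl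
        (fun (st : List String × Int) _ =>
          (st.1 ++ ["count_worker_" ++ PySem.Int.toStr st.2], st.2 + 1))
        ([], acc.2)
      let shard_str := "[" ++ PySem.Str.join "," (inner.1.map (fun q => "\"" ++ q ++ "\"")) ++ "]"
      (acc.1 ++ [shard_str], inner.2))
    ([], 1)
  "[" ++ PySem.Str.join "," res.1 ++ "]"

-- ===== PORT B =====
def generate_output_queues_config_alt (num_shards : Int) (num_workers_per_shard : Int) : String :=
  let n := max num_shards 0
  let w := max num_workers_per_shard 0
  let names := (PySem.List.pyRange 1 (n * w + 1) 1).map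
    (fun k => "\"count_worker_" ++ PySem.Int.toStr k ++ "\"")
  "[" ++ PySem.Str.join "," ((PySem.List.pyRange 0 n 1).map (fun s =>
    "[" ++ PySem.Str.join "," (PySem.List.slice names (some (s * w)) (some ((s + 1) * w))) ++ "]"))
    ++ "]"

-- ===== PRECONDITION & SPEC =====
def Spec_generate_output_queues_config (num_shards : Int) (num_workers_per_shard : Int) (out : String) : Prop := out = generate_output_queues_config_alt num_shards num_workers_per_shard
instance (num_shards : Int) (num_workers_per_shard : Int) (out : String) : Decidable (Spec_generate_output_queues_config num_shards num_workers_per_shard out) := by unfold Spec_generate_output_queues_config; infer_instance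

-- ===== CLAIM (what is proved, stated in full; the proofs are below) =====
def Claim_equal_generate_output_queues_config : Prop := ∀ (num_shards : Int) (num_workers_per_shard : Int), Dom_generate_output_queues_config num_shards num_workers_per_shard → Spec_generate_output_queues_config num_shards num_workers_per_shard (generate_output_queues_config num_shards num_workers_per_shard)

-- ===== LEMMAS AND PROOFS =====

-- the name of worker k
def pvName (k : Int) : String := "count_worker_" ++ PySem.Int.toStr k

-- A's inner-loop step (definitionally equal to the lambda in the port of A)
def pvIStep (st : List String × Int) (_ : Int) : List String × Int :=
  (st.1 ++ [pvName st.2], st.2 + 1)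

-- A's outer-loop step (definitionally equal to the lambda in the port of A)
def pvStep (acc : List String × Int) (worker_count : Int) : List String × Int :=
  let inner := (PySem.List.pyRange 0 worker_count 1).foldl pvIStep ([], acc.2)
  (acc.1 ++ ["[" ++ PySem.Str.join "," (inner.1.map (fun q => "\"" ++ q ++ "\"")) ++ "]"], inner.2)

-- the quoted name of worker k, as A builds it
def pvQ (k : Int) : String := "\"" ++ pvName k ++ "\""

-- A's shard string when the counter starts at k0 and the shard has m workers
def pvF (m : Nat) (k0 : Int) : String :=
  "[" ++ PySem.Str.join "," ((List.range m).map (fun (j : Nat) => pvQ (k0 + (j : Int)))) ++ "]"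

-- A's quoted name coincides with B's f-string
theorem pvQEq (k : Int) : pvQ k = "\"count_worker_" ++ PySem.Int.toStr k ++ "\"" := by
  show ("\"" ++ ("count_worker_" ++ PySem.Int.toStr k)) ++ "\"" = _
  rw [← String.append_assoc, show ("\"" ++ "count_worker_" : String) = "\"count_worker_" from rfl]

-- A's inner loop: builds consecutive names and advances the counter by the list length
theorem pvInner (l : List Int) (acc : List String) (k : Int) :
    l.foldl pvIStep (acc, k)
    = (acc ++ (List.range l.length).map (fun (j : Nat) => pvName (k + (j : Int))),
       k + (l.length : Int)) := by
  induction l generalizing acc k with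
  | nil => simp
  | cons a t ih =>
    rw [List.foldl_cons]
    show List.foldl pvIStep (acc ++ [pvName k], k + 1) t = _
    rw [ih]
    simp only [Prod.mk.injEq, List.length_cons, List.range_succ_eq_map, List.map_cons,
      List.map_map, List.append_assoc, List.singleton_append]
    refine ⟨?_, by push_cast; ring⟩
    congr 2
    · norm_num
    · apply List.map_congr_left
      intro j _
      simp only [Function.comp_apply]
      congr 1
      push_cast
      ring

-- A's one outer step from counter k
theorem pvStepEq (w : Int) (acc : List String) (k : Int) :
    pvStep (acc, k) w = (acc ++ [pvF w.toNat k], k + (w.toNat : Int)) := by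
  have hlen : (PySem.List.pyRange 0 w 1).length = w.toNat := by
    simp [PySem.List.length_pyRange_one]
  simp only [pvStep, pvInner, hlen, List.nil_append, Prod.mk.injEq]
  refine ⟨by simp [pvF, pvQ, Function.comp_def], trivial⟩

-- A's outer loop over 'replicate n w' starting at counter k
theorem pvOuter (w : Int) (n : Nat) (acc : List String) (k : Int) :
    (List.replicate n w).foldl pvStep (acc, k)
    = (acc ++ (List.range n).map (fun (s : Nat) => pvF w.toNat (k + (s : Int) * (w.toNat : Int))),
       k + (n : Int) * (w.toNat : Int)) := by
  induction n generalizing acc k with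
  | zero => simp
  | succ n ih =>
    rw [List.replicate_succ, List.foldl_cons, pvStepEq, ih]
    simp only [Prod.mk.injEq, List.range_succ_eq_map, List.map_cons, List.map_map,
      List.append_assoc, List.singleton_append]
    refine ⟨?_, by push_cast; ring⟩
    congr 2
    · norm_num
    · apply List.map_congr_left
      intro s _
      simp only [Function.comp_apply]
      congr 1
      push_cast
      ring

-- slicing a map over a range out of the flat list is a map over the chunk's range
theorem pvChunk (m N s : Nat) (h : (s + 1) * m ≤ N) (g : Nat → String) :
    (((List.range N).map g).drop (s * m)).take m
    = (List.range m).map (fun j => g (s * m + j)) := by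
  have h' : s * m + m ≤ N := by simpa [add_mul, one_mul] using h
  apply List.ext_getElem
  · simp only [List.length_take, List.length_drop, List.length_map, List.length_range]
    omega
  · intro i h1 h2
    simp only [List.getElem_take, List.getElem_drop, List.getElem_map, List.getElem_range]

-- ===== VERDICT (by name: the statement is the Claim_ definition above) =====
theorem generate_output_queues_config_spec : Claim_equal_generate_output_queues_config := by
  intro ns w _
  show "[" ++ PySem.Str.join ","
      ((PySem.List.pyRepeat [w] ns).foldl pvStep ([], 1)).1 ++ "]"
    = "[" ++ PySem.Str.join ","
      ((PySem.List.pyRange 0 (max ns 0) 1).map (fun s =>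
        "[" ++ PySem.Str.join ","
          (PySem.List.slice
            ((PySem.List.pyRange 1 (max ns 0 * max w 0 + 1) 1).map
              (fun k => "\"count_worker_" ++ PySem.Int.toStr k ++ "\""))
            (some (s * max w 0)) (some ((s + 1) * max w 0))) ++ "]")) ++ "]"
  rw [PySem.List.pyRepeat_singleton, pvOuter]
  have hn : (max ns 0) = ((ns.toNat : Int)) := by omega
  have hw : (max w 0) = ((w.toNat : Int)) := by omega
  rw [hn, hw]
  rw [PySem.List.pyRange_one 0 ((ns.toNat : Int)),
      PySem.List.pyRange_one 1 ((ns.toNat : Int) * (w.toNat : Int) + 1)]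
  have e1 : (((ns.toNat : Int)) - 0).toNat = ns.toNat := by omega
  have e2 : ((ns.toNat : Int) * (w.toNat : Int) + 1 - 1).toNat = ns.toNat * w.toNat := by
    rw [show ((ns.toNat : Int) * (w.toNat : Int) + 1 - 1)
        = ((ns.toNat * w.toNat : Nat) : Int) by push_cast; ring, Int.toNat_natCast]
  rw [e1, e2]
  simp only [List.nil_append, List.map_map, zero_add]
  congr 2
  congr 1
  apply List.map_congr_left
  intro s hs
  simp only [Function.comp_apply]
  rw [show ((s : Int)) * ((w.toNat : Int)) = (((s * w.toNat : Nat)) : Int) by push_cast; ring]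
  rw [show ((s : Int) + 1) * ((w.toNat : Int))
      = (((s * w.toNat : Nat)) : Int) + ((w.toNat : Nat) : Int) by push_cast; ring]
  rw [PySem.List.slice_natCast_add]
  rw [pvChunk w.toNat (ns.toNat * w.toNat) s
      (Nat.mul_le_mul_right _ (List.mem_range.mp hs)) _]
  simp only [pvF]
  congr 2
  congr 1
  apply List.map_congr_left
  intro j _
  simp only [Function.comp_apply]
  rw [pvQEq, show (1 : Int) + ((s * w.toNat : Nat) : Int) + (j : Int)
      = 1 + (((s * w.toNat + j : Nat)) : Int) by push_cast; ring]
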